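-- pv_equiv track=rewrite | github.com/AlejandroRJBatuecas/TFG_ProyectoML | metrics/ast_file_reader.py | count_instructions
-- ===== SOURCE A (Python) =====
-- def count_instructions(instructions):
--     counting = {}
--     for circuit, instruction in instructions:
--         if circuit not in counting:
--             counting[circuit] = {}
--         if instruction not in counting[circuit]:
--             counting[circuit][instruction] = 0
--         counting[circuit][instruction] += 1
--     return counting
-- ===== SOURCE B (Python) =====
-- def count_instructions(instructions):
--     # Pass 1: flat tally keyed by (circuit, instruction) pairs.
--     counts = {}
--     for pair in instructions:
--         counts[pair] = counts.get(pair, 0) + 1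
--     # Pass 2: reshape the flat tally into the nested per-circuit dict.
--     result = {}
--     for (circuit, instruction), n in counts.items():
--         result.setdefault(circuit, {})[instruction] = n
--     return result
-- ===== Notes on version B (the rewrite author's own statement) =====
-- stated objective: alternative
-- what changed: B first builds a flat tally keyed by (circuit, instruction) pairs in one pass and then reshapes that tally into the nested per-circuit dict in a second pass over its items, instead of A's single pass of incremental nested-dict updates.
import Mathlib
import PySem

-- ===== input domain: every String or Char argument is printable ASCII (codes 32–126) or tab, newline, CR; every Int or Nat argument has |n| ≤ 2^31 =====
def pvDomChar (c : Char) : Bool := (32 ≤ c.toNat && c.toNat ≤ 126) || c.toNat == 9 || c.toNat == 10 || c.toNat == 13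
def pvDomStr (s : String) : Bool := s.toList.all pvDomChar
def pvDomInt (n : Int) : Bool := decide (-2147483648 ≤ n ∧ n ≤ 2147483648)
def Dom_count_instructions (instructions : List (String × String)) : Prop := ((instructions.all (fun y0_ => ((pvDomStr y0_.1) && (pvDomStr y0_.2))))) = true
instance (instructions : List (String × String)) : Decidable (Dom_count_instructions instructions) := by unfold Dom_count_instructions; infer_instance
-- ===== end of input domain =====

-- B builds a flat (circuit, instruction)-keyed tally in one pass and reshapes it into the
-- nested per-circuit dict in a second pass, instead of A's incremental nested-dict updates;
-- objective: alternative decomposition (same asymptotic cost).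


-- ===== PORT A =====
-- counting = {}; for circuit, instruction in instructions: … ; return counting
def count_instructions (instructions : List (String × String)) : List (String × List (String × Int)) :=
  (instructions.foldl
    (fun (counting : PySem.Dict String (PySem.Dict String Int)) pq =>
      -- if circuit not in counting: counting[circuit] = {}
      let counting := if counting.contains pq.1 then counting else counting.insert pq.1 PySem.Dict.empty
      let inner := counting.getD pq.1 PySem.Dict.empty
      -- if instruction not in counting[circuit]: counting[circuit][instruction] = 0
      let inner := if inner.contains pq.2 then inner else inner.insert pq.2 0
      -- counting[circuit][instruction] += 1
      counting.insert pq.1 (inner.insert pq.2 (inner.getD pq.2 0 + 1)))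
    PySem.Dict.empty).items.map (fun ci => (ci.1, ci.2.items))

-- ===== PORT B =====
-- counts = {}; for pair in instructions: counts[pair] = counts.get(pair, 0) + 1
-- result = {}; for (circuit, instruction), n in counts.items(): result.setdefault(circuit, {})[instruction] = n
def count_instructions_alt (instructions : List (String × String)) : List (String × List (String × Int)) :=
  let counts := instructions.foldl
    (fun (d : PySem.Dict (String × String) Int) pair => d.insert pair (d.getD pair 0 + 1))
    PySem.Dict.empty
  let result := counts.items.foldl
    (fun (r : PySem.Dict String (PySem.Dict String Int)) e =>
      let r := r.setdefault e.1.1 PySem.Dict.empty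
      r.insert e.1.1 ((r.getD e.1.1 PySem.Dict.empty).insert e.1.2 e.2))
    PySem.Dict.empty
  result.items.map (fun ci => (ci.1, ci.2.items))

-- ===== PRECONDITION & SPEC =====
def Spec_count_instructions (instructions : List (String × String)) (out : List (String × List (String × Int))) : Prop := out = count_instructions_alt instructions
instance (instructions : List (String × String)) (out : List (String × List (String × Int))) : Decidable (Spec_count_instructions instructions out) := by unfold Spec_count_instructions; infer_instance

-- ===== CLAIM (what is proved, stated in full; the proofs are below) =====
def Claim_equal_count_instructions : Prop := ∀ (instructions : List (String × String)), Dom_count_instructions instructions → Spec_count_instructions instructions (count_instructions instructions)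

-- ===== LEMMAS AND PROOFS =====

-- A's loop body / B's reshape-loop body, as named step functions (definitionally the ports' lambdas).
def pvStepA (counting : PySem.Dict String (PySem.Dict String Int)) (pq : String × String) :
    PySem.Dict String (PySem.Dict String Int) :=
  let counting := if counting.contains pq.1 then counting else counting.insert pq.1 PySem.Dict.empty
  let inner := counting.getD pq.1 PySem.Dict.empty
  let inner := if inner.contains pq.2 then inner else inner.insert pq.2 0
  counting.insert pq.1 (inner.insert pq.2 (inner.getD pq.2 0 + 1))

def pvStepB (r : PySem.Dict String (PySem.Dict String Int)) (e : (String × String) × Int) :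
    PySem.Dict String (PySem.Dict String Int) :=
  let r := r.setdefault e.1.1 PySem.Dict.empty
  r.insert e.1.1 ((r.getD e.1.1 PySem.Dict.empty).insert e.1.2 e.2)

-- canonical value of A's nested dict after the whole loop
def pvInnerOf (xs : List (String × String)) (c : String) : List (String × Int) :=
  ((PySem.List.dedup xs).filter (fun q => q.1 == c)).map (fun q => (q.2, (xs.count q : Int)))

def pvCanon (xs : List (String × String)) : List (String × PySem.Dict String Int) :=
  (PySem.List.dedup (xs.map (·.1))).map (fun c => (c, PySem.Dict.mk (pvInnerOf xs c)))

-- canonical value of B's reshape fold over an arbitrary items list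
def pvCOInner (l : List ((String × String) × Int)) (c : String) : List (String × Int) :=
  (l.filter (fun e => e.1.1 == c)).map (fun e => (e.1.2, e.2))

def pvCanonOf (l : List ((String × String) × Int)) : List (String × PySem.Dict String Int) :=
  (PySem.List.dedup (l.map (·.1.1))).map (fun c => (c, PySem.Dict.mk (pvCOInner l c)))

lemma pv_dedup_append {α : Type} [BEq α] [LawfulBEq α] (xs : List α) (x : α) :
    PySem.List.dedup (xs ++ [x]) =
      if x ∈ xs then PySem.List.dedup xs else PySem.List.dedup xs ++ [x] := by
  simp only [PySem.List.dedup_eq_ofList, PySem.Set.ofList_append_singleton, PySem.Set.add]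
  by_cases hx : x ∈ xs
  · simp [PySem.Set.contains, PySem.Set.mem_ofList, hx]
  · simp [PySem.Set.contains, PySem.Set.mem_ofList, hx]

lemma pv_dedup_map_dedup {α β : Type} [BEq α] [LawfulBEq α] [BEq β] [LawfulBEq β]
    (xs : List α) (f : α → β) :
    PySem.List.dedup ((PySem.List.dedup xs).map f) = PySem.List.dedup (xs.map f) := by
  induction xs using List.reverseRecOn with
  | nil => rfl
  | append_singleton xs x ih =>
    by_cases hx : x ∈ xs
    · rw [pv_dedup_append xs x, if_pos hx]
      simp only [List.map_append, List.map_cons, List.map_nil]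
      rw [pv_dedup_append (xs.map f) (f x), if_pos (List.mem_map_of_mem hx)]
      exact ih
    · rw [pv_dedup_append xs x, if_neg hx]
      simp only [List.map_append, List.map_cons, List.map_nil]
      rw [pv_dedup_append ((PySem.List.dedup xs).map f) (f x), pv_dedup_append (xs.map f) (f x)]
      by_cases hfx : f x ∈ xs.map f
      · have h1 : f x ∈ (PySem.List.dedup xs).map f := by
          obtain ⟨a, ha, hae⟩ := List.mem_map.mp hfx
          exact hae ▸ List.mem_map_of_mem ((PySem.List.mem_dedup xs a).mpr ha)
        rw [if_pos h1, if_pos hfx]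
        exact ih
      · have h1 : f x ∉ (PySem.List.dedup xs).map f := by
          intro hmem
          obtain ⟨a, ha, hae⟩ := List.mem_map.mp hmem
          exact hfx (hae ▸ List.mem_map_of_mem ((PySem.List.mem_dedup xs a).mp ha))
        rw [if_neg h1, if_neg hfx, ih]

lemma pv_count_append_ne (xs : List (String × String)) (p q : String × String) (h : q ≠ p) :
    (xs ++ [p]).count q = xs.count q := by
  simp [List.count_append, Ne.symm h]

lemma pv_innerOf_nil (xs : List (String × String)) (c : String) (hc : c ∉ xs.map (·.1)) :
    pvInnerOf xs c = [] := by
  unfold pvInnerOf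
  rw [List.filter_eq_nil_iff.mpr, List.map_nil]
  intro q hq hbeq
  exact hc (List.mem_map.mpr ⟨q, (PySem.List.mem_dedup xs q).mp hq, by simpa using hbeq⟩)

lemma pv_innerOf_append_ne (xs : List (String × String)) (p : String × String) (c' : String)
    (h : p.1 ≠ c') : pvInnerOf (xs ++ [p]) c' = pvInnerOf xs c' := by
  have hcong : ((PySem.List.dedup xs).filter (fun q => q.1 == c')).map
        (fun q => (q.2, ((xs ++ [p]).count q : Int)))
      = ((PySem.List.dedup xs).filter (fun q => q.1 == c')).map
        (fun q => (q.2, (xs.count q : Int))) := by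
    apply List.map_congr_left
    intro q hq
    have hq1 : q.1 = c' := by simpa using (List.mem_filter.mp hq).2
    have hqp : q ≠ p := fun e => h (by rw [← e]; exact hq1)
    rw [pv_count_append_ne xs p q hqp]
  unfold pvInnerOf
  rw [pv_dedup_append]
  split_ifs with hp
  · exact hcong
  · rw [List.filter_append, show List.filter (fun q => q.1 == c') [p] = [] from by simp [h],
      List.append_nil]
    exact hcong

lemma pv_innerOf_append_fresh (xs : List (String × String)) (p : String × String) (hp : p ∉ xs) :
    pvInnerOf (xs ++ [p]) p.1 = pvInnerOf xs p.1 ++ [(p.2, 1)] := by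
  unfold pvInnerOf
  rw [pv_dedup_append, if_neg hp, List.filter_append,
    show List.filter (fun q => q.1 == p.1) [p] = [p] from by simp, List.map_append]
  congr 1
  · apply List.map_congr_left
    intro q hq
    have hq' : q ∈ xs := (PySem.List.mem_dedup xs q).mp (List.mem_filter.mp hq).1
    have hqp : q ≠ p := fun e => hp (e ▸ hq')
    rw [pv_count_append_ne xs p q hqp]
  · simp [List.count_append, List.count_eq_zero_of_not_mem hp]

lemma pv_innerOf_append_mem (xs : List (String × String)) (p : String × String) (hp : p ∈ xs) :
    pvInnerOf (xs ++ [p]) p.1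
      = (pvInnerOf xs p.1).map
          (fun e => if e.1 == p.2 then (p.2, (xs.count p : Int) + 1) else e) := by
  unfold pvInnerOf
  rw [pv_dedup_append, if_pos hp, List.map_map]
  apply List.map_congr_left
  intro q hq
  have hq1 : q.1 = p.1 := by simpa using (List.mem_filter.mp hq).2
  by_cases hqi : q.2 = p.2
  · have hqp : q = p := by
      cases q; cases p; simp_all
    subst hqp
    simp [Function.comp, List.count_append]
  · have hne : (q.2 == p.2) = false := by simp [hqi]
    have hqp : q ≠ p := fun e => hqi (by rw [e])
    simp only [Function.comp, hne, Bool.false_eq_true, if_false]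
    rw [pv_count_append_ne xs p q hqp]

lemma pv_nodup_inner_keys (xs : List (String × String)) (c : String) :
    ((pvInnerOf xs c).map (·.1)).Nodup := by
  unfold pvInnerOf
  rw [List.map_map]
  apply List.Nodup.map_on
  · intro q hq q' hq' he
    have h1 : q.1 = c := by simpa using (List.mem_filter.mp hq).2
    have h2 : q'.1 = c := by simpa using (List.mem_filter.mp hq').2
    have h3 : q.2 = q'.2 := by simpa using he
    cases q; cases q'; simp_all
  · exact (PySem.List.nodup_dedup xs).filter _

lemma pv_keys_canon (xs : List (String × String)) :
    (PySem.Dict.mk (pvCanon xs)).keys = PySem.List.dedup (xs.map (·.1)) := by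
  simp [pvCanon, PySem.Dict.keys_mk, List.map_map, Function.comp_def]

lemma pv_contains_canon (xs : List (String × String)) (c : String) :
    (PySem.Dict.mk (pvCanon xs)).contains c = true ↔ c ∈ xs.map (·.1) := by
  rw [PySem.Dict.contains_iff_mem_keys, pv_keys_canon, PySem.List.mem_dedup]

lemma pv_nodup_keys_canon (xs : List (String × String)) :
    (PySem.Dict.mk (pvCanon xs)).keys.Nodup := by
  rw [pv_keys_canon]; exact PySem.List.nodup_dedup _

lemma pv_getD_canon (xs : List (String × String)) (c : String) (hc : c ∈ xs.map (·.1)) :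
    (PySem.Dict.mk (pvCanon xs)).getD c PySem.Dict.empty = PySem.Dict.mk (pvInnerOf xs c) := by
  have hmem : (c, PySem.Dict.mk (pvInnerOf xs c)) ∈ (PySem.Dict.mk (pvCanon xs)).items :=
    List.mem_map_of_mem ((PySem.List.mem_dedup (xs.map (·.1)) c).mpr hc)
  exact PySem.Dict.getD_of_mem_items _ hmem (pv_nodup_keys_canon xs) _

lemma pv_inner_contains (xs : List (String × String)) (c i : String) :
    (PySem.Dict.mk (pvInnerOf xs c)).contains i = true ↔ (c, i) ∈ xs := by
  rw [PySem.Dict.contains_iff_mem_keys, PySem.Dict.keys_mk]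
  unfold pvInnerOf
  rw [List.map_map]
  simp only [List.mem_map, List.mem_filter, PySem.List.mem_dedup, Function.comp]
  constructor
  · rintro ⟨q, ⟨hmem, hbeq⟩, hqi⟩
    have h1 : q.1 = c := by simpa using hbeq
    have h2 : q.2 = i := hqi
    have : q = (c, i) := by cases q; simp_all
    exact this ▸ hmem
  · intro hmem
    exact ⟨(c, i), ⟨hmem, by simp⟩, rfl⟩

lemma pv_inner_getD (xs : List (String × String)) (c i : String) (h : (c, i) ∈ xs) :
    (PySem.Dict.mk (pvInnerOf xs c)).getD i 0 = (xs.count (c, i) : Int) := by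
  have hmem : (i, (xs.count (c, i) : Int)) ∈ pvInnerOf xs c := by
    unfold pvInnerOf
    exact List.mem_map.mpr
      ⟨(c, i), List.mem_filter.mpr ⟨(PySem.List.mem_dedup xs _).mpr h, by simp⟩, rfl⟩
  exact PySem.Dict.getD_of_mem_items _ hmem
    (by rw [PySem.Dict.keys_mk]; exact pv_nodup_inner_keys xs c) _

lemma pv_stepA_canon (xs : List (String × String)) (p : String × String) :
    pvStepA (PySem.Dict.mk (pvCanon xs)) p = PySem.Dict.mk (pvCanon (xs ++ [p])) := by
  obtain ⟨c, i⟩ := p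
  by_cases hc : c ∈ xs.map (·.1)
  · have hcon : (PySem.Dict.mk (pvCanon xs)).contains c = true := (pv_contains_canon xs c).mpr hc
    have hd : PySem.List.dedup ((xs ++ [(c, i)]).map (·.1)) = PySem.List.dedup (xs.map (·.1)) := by
      simp only [List.map_append, List.map_cons, List.map_nil]
      rw [pv_dedup_append, if_pos hc]
    by_cases hp : (c, i) ∈ xs
    · have hic : (PySem.Dict.mk (pvInnerOf xs c)).contains i = true :=
        (pv_inner_contains xs c i).mpr hp
      simp only [pvStepA, hcon, if_true, pv_getD_canon xs c hc, hic]
      rw [pv_inner_getD xs c i hp]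
      apply PySem.Dict.ext
      rw [PySem.Dict.items_insert_of_contains _ _ hcon]
      show (pvCanon xs).map _ = pvCanon (xs ++ [(c, i)])
      unfold pvCanon
      rw [hd, List.map_map]
      apply List.map_congr_left
      intro c' hc'
      by_cases hcc : c' = c
      · subst hcc
        simp only [Function.comp, beq_self_eq_true, if_true]
        congr 1
        apply PySem.Dict.ext
        rw [PySem.Dict.items_insert_of_contains _ _ hic]
        show (pvInnerOf xs c').map _ = pvInnerOf (xs ++ [(c', i)]) c'
        rw [pv_innerOf_append_mem xs (c', i) hp]
      · have hbe : (c' == c) = false := by simp [hcc]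
        simp only [Function.comp, hbe, Bool.false_eq_true, if_false]
        rw [pv_innerOf_append_ne xs (c, i) c' (fun e => hcc e.symm)]
    · have hic : (PySem.Dict.mk (pvInnerOf xs c)).contains i = false :=
        Bool.eq_false_iff.mpr (fun ht => hp ((pv_inner_contains xs c i).mp ht))
      simp only [pvStepA, hcon, if_true, pv_getD_canon xs c hc, hic, Bool.false_eq_true, if_false]
      rw [PySem.Dict.getD_insert_self, PySem.Dict.insert_insert_self, zero_add]
      apply PySem.Dict.ext
      rw [PySem.Dict.items_insert_of_contains _ _ hcon]
      show (pvCanon xs).map _ = pvCanon (xs ++ [(c, i)])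
      unfold pvCanon
      rw [hd, List.map_map]
      apply List.map_congr_left
      intro c' hc'
      by_cases hcc : c' = c
      · subst hcc
        simp only [Function.comp, beq_self_eq_true, if_true]
        congr 1
        apply PySem.Dict.ext
        rw [PySem.Dict.items_insert_of_not_contains _ _ hic]
        show pvInnerOf xs c' ++ [(i, 1)] = pvInnerOf (xs ++ [(c', i)]) c'
        rw [pv_innerOf_append_fresh xs (c', i) hp]
      · have hbe : (c' == c) = false := by simp [hcc]
        simp only [Function.comp, hbe, Bool.false_eq_true, if_false]
        rw [pv_innerOf_append_ne xs (c, i) c' (fun e => hcc e.symm)]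
  · have hcon : (PySem.Dict.mk (pvCanon xs)).contains c = false :=
      Bool.eq_false_iff.mpr (fun ht => hc ((pv_contains_canon xs c).mp ht))
    have hp : (c, i) ∉ xs := fun h => hc (List.mem_map_of_mem h)
    simp only [pvStepA, hcon, Bool.false_eq_true, if_false, PySem.Dict.getD_insert_self,
      PySem.Dict.contains_empty, PySem.Dict.insert_insert_self, zero_add]
    apply PySem.Dict.ext
    rw [PySem.Dict.items_insert_of_not_contains _ _ hcon]
    show pvCanon xs ++ [(c, PySem.Dict.empty.insert i 1)] = pvCanon (xs ++ [(c, i)])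
    unfold pvCanon
    have hd : PySem.List.dedup ((xs ++ [(c, i)]).map (·.1))
        = PySem.List.dedup (xs.map (·.1)) ++ [c] := by
      simp only [List.map_append, List.map_cons, List.map_nil]
      rw [pv_dedup_append, if_neg hc]
    rw [hd, List.map_append]
    congr 1
    · apply List.map_congr_left
      intro c' hc'
      have hne : c' ≠ c := fun e => hc (e ▸ (PySem.List.mem_dedup (xs.map (·.1)) c').mp hc')
      rw [pv_innerOf_append_ne xs (c, i) c' (fun e => hne e.symm)]
    · simp only [List.map_cons, List.map_nil]
      congr 2
      apply PySem.Dict.ext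
      rw [PySem.Dict.items_insert_of_not_contains _ _ (PySem.Dict.contains_empty i)]
      show ([] : List (String × Int)) ++ [(i, 1)] = pvInnerOf (xs ++ [(c, i)]) c
      rw [show c = ((c, i) : String × String).1 from rfl, pv_innerOf_append_fresh xs (c, i) hp,
        pv_innerOf_nil xs (c, i).1 hc, List.nil_append]

lemma pv_foldA_eq (xs : List (String × String)) :
    xs.foldl pvStepA PySem.Dict.empty = PySem.Dict.mk (pvCanon xs) := by
  induction xs using List.reverseRecOn with
  | nil => rfl
  | append_singleton xs p ih =>
    rw [List.foldl_append, List.foldl_cons, List.foldl_nil, ih, pv_stepA_canon]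

lemma pv_keys_canonOf (l : List ((String × String) × Int)) :
    (PySem.Dict.mk (pvCanonOf l)).keys = PySem.List.dedup (l.map (·.1.1)) := by
  simp [pvCanonOf, PySem.Dict.keys_mk, List.map_map, Function.comp_def]

lemma pv_contains_canonOf (l : List ((String × String) × Int)) (c : String) :
    (PySem.Dict.mk (pvCanonOf l)).contains c = true ↔ c ∈ l.map (·.1.1) := by
  rw [PySem.Dict.contains_iff_mem_keys, pv_keys_canonOf, PySem.List.mem_dedup]

lemma pv_getD_canonOf (l : List ((String × String) × Int)) (c : String)
    (hc : c ∈ l.map (·.1.1)) :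
    (PySem.Dict.mk (pvCanonOf l)).getD c PySem.Dict.empty = PySem.Dict.mk (pvCOInner l c) := by
  have hmem : (c, PySem.Dict.mk (pvCOInner l c)) ∈ (PySem.Dict.mk (pvCanonOf l)).items :=
    List.mem_map_of_mem ((PySem.List.mem_dedup (l.map (·.1.1)) c).mpr hc)
  exact PySem.Dict.getD_of_mem_items _ hmem
    (by rw [pv_keys_canonOf]; exact PySem.List.nodup_dedup _) _

lemma pv_coinner_contains (l : List ((String × String) × Int)) (c i : String) :
    (PySem.Dict.mk (pvCOInner l c)).contains i = true ↔ (c, i) ∈ l.map (·.1) := by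
  rw [PySem.Dict.contains_iff_mem_keys, PySem.Dict.keys_mk]
  unfold pvCOInner
  rw [List.map_map]
  simp only [List.mem_map, List.mem_filter, Function.comp]
  constructor
  · rintro ⟨e, ⟨hmem, hbeq⟩, hei⟩
    have h1 : e.1.1 = c := by simpa using hbeq
    exact ⟨e, hmem, by cases e with | mk a b => cases a; simp_all⟩
  · rintro ⟨e, hmem, hkey⟩
    exact ⟨e, ⟨hmem, by simp [show e.1.1 = c from by rw [hkey]]⟩, by rw [hkey]⟩

lemma pv_coinner_append_ne (l : List ((String × String) × Int)) (e : (String × String) × Int)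
    (c' : String) (h : e.1.1 ≠ c') : pvCOInner (l ++ [e]) c' = pvCOInner l c' := by
  unfold pvCOInner
  rw [List.filter_append, show List.filter (fun x => x.1.1 == c') [e] = [] from by simp [h],
    List.append_nil]

lemma pv_coinner_append_self (l : List ((String × String) × Int))
    (e : (String × String) × Int) :
    pvCOInner (l ++ [e]) e.1.1 = pvCOInner l e.1.1 ++ [(e.1.2, e.2)] := by
  unfold pvCOInner
  rw [List.filter_append, show List.filter (fun x => x.1.1 == e.1.1) [e] = [e] from by simp]
  simp

lemma pv_stepB_canon (l : List ((String × String) × Int)) (e : (String × String) × Int)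
    (h : ((l ++ [e]).map (·.1)).Nodup) :
    pvStepB (PySem.Dict.mk (pvCanonOf l)) e = PySem.Dict.mk (pvCanonOf (l ++ [e])) := by
  obtain ⟨⟨c, i⟩, n⟩ := e
  have hkey : ((c, i) : String × String) ∉ l.map (·.1) := by
    intro hmem
    rw [List.map_append] at h
    exact (List.disjoint_of_nodup_append h) hmem (by simp)
  by_cases hc : c ∈ l.map (·.1.1)
  · have hcon : (PySem.Dict.mk (pvCanonOf l)).contains c = true := (pv_contains_canonOf l c).mpr hc
    have hii : (PySem.Dict.mk (pvCOInner l c)).contains i = false :=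
      Bool.eq_false_iff.mpr (fun ht => hkey ((pv_coinner_contains l c i).mp ht))
    simp only [pvStepB, PySem.Dict.setdefault_of_contains _ _ hcon, pv_getD_canonOf l c hc]
    apply PySem.Dict.ext
    rw [PySem.Dict.items_insert_of_contains _ _ hcon]
    show (pvCanonOf l).map _ = pvCanonOf (l ++ [((c, i), n)])
    unfold pvCanonOf
    rw [show PySem.List.dedup ((l ++ [((c, i), n)]).map (·.1.1))
        = PySem.List.dedup (l.map (·.1.1)) from by
      simp only [List.map_append, List.map_cons, List.map_nil]
      rw [pv_dedup_append, if_pos hc]]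
    rw [List.map_map]
    apply List.map_congr_left
    intro c' hc'
    by_cases hcc : c' = c
    · subst hcc
      simp only [Function.comp, beq_self_eq_true, if_true]
      congr 1
      apply PySem.Dict.ext
      rw [PySem.Dict.items_insert_of_not_contains _ _ hii]
      show pvCOInner l c' ++ [(i, n)] = pvCOInner (l ++ [((c', i), n)]) c'
      exact (pv_coinner_append_self l ((c', i), n)).symm
    · have hbe : (c' == c) = false := by simp [hcc]
      simp only [Function.comp, hbe, Bool.false_eq_true, if_false]
      rw [pv_coinner_append_ne l ((c, i), n) c' (fun x => hcc x.symm)]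
  · have hcon : (PySem.Dict.mk (pvCanonOf l)).contains c = false :=
      Bool.eq_false_iff.mpr (fun ht => hc ((pv_contains_canonOf l c).mp ht))
    simp only [pvStepB, PySem.Dict.setdefault_of_not_contains _ _ hcon,
      PySem.Dict.getD_insert_self, PySem.Dict.insert_insert_self]
    apply PySem.Dict.ext
    rw [PySem.Dict.items_insert_of_not_contains _ _ hcon]
    show pvCanonOf l ++ [(c, PySem.Dict.empty.insert i n)] = pvCanonOf (l ++ [((c, i), n)])
    unfold pvCanonOf
    rw [show PySem.List.dedup ((l ++ [((c, i), n)]).map (·.1.1))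
        = PySem.List.dedup (l.map (·.1.1)) ++ [c] from by
      simp only [List.map_append, List.map_cons, List.map_nil]
      rw [pv_dedup_append, if_neg hc]]
    rw [List.map_append]
    congr 1
    · apply List.map_congr_left
      intro c' hc'
      have hne : c' ≠ c := fun x => hc (x ▸ (PySem.List.mem_dedup (l.map (·.1.1)) c').mp hc')
      rw [pv_coinner_append_ne l ((c, i), n) c' (fun x => hne x.symm)]
    · simp only [List.map_cons, List.map_nil]
      congr 2
      apply PySem.Dict.ext
      rw [PySem.Dict.items_insert_of_not_contains _ _ (PySem.Dict.contains_empty i)]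
      show ([] : List (String × Int)) ++ [(i, n)] = pvCOInner (l ++ [((c, i), n)]) c
      rw [show c = (((c, i), n) : (String × String) × Int).1.1 from rfl,
        pv_coinner_append_self l ((c, i), n)]
      rw [show pvCOInner l c = [] from by
        unfold pvCOInner
        rw [List.filter_eq_nil_iff.mpr, List.map_nil]
        intro x hx hbeq
        exact hc (List.mem_map.mpr ⟨x, hx, by simpa using hbeq⟩)]

lemma pv_foldB_eq (l : List ((String × String) × Int)) (h : (l.map (·.1)).Nodup) :
    l.foldl pvStepB PySem.Dict.empty = PySem.Dict.mk (pvCanonOf l) := by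
  induction l using List.reverseRecOn with
  | nil => rfl
  | append_singleton l e ih =>
      rw [List.foldl_append, List.foldl_cons, List.foldl_nil,
        ih (by have h2 := h; rw [List.map_append] at h2; exact h2.of_append_left),
        pv_stepB_canon l e h]

lemma pv_canonOf_counter (xs : List (String × String)) :
    pvCanonOf ((PySem.Dict.counter xs).items) = pvCanon xs := by
  rw [PySem.Dict.items_counter]
  unfold pvCanonOf pvCanon
  have h1 : ((PySem.Set.ofList xs).map (fun k => (k, (List.count k xs : Int)))).map (·.1.1)
      = (PySem.List.dedup xs).map (·.1) := by
    simp [List.map_map, Function.comp]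
  rw [h1, pv_dedup_map_dedup]
  apply List.map_congr_left
  intro c hc
  congr 1
  unfold pvCOInner pvInnerOf
  rw [List.filter_map, List.map_map]
  rfl

-- ===== VERDICT (by name: the statement is the Claim_ definition above) =====
theorem count_instructions_spec : Claim_equal_count_instructions := by
  intro xs _
  show count_instructions xs = count_instructions_alt xs
  have hA : count_instructions xs
      = (xs.foldl pvStepA PySem.Dict.empty).items.map (fun ci => (ci.1, ci.2.items)) := rfl
  have hB : count_instructions_alt xs
      = ((PySem.Dict.counter xs).items.foldl pvStepB PySem.Dict.empty).items.map
          (fun ci => (ci.1, ci.2.items)) := by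
    show ((xs.foldl (fun (d : PySem.Dict (String × String) Int) pair =>
        d.insert pair (d.getD pair 0 + 1)) PySem.Dict.empty).items.foldl pvStepB
        PySem.Dict.empty).items.map (fun ci => (ci.1, ci.2.items)) = _
    rw [PySem.Dict.foldl_insert_getD_add_one_eq_counter]
  rw [hA, hB, pv_foldA_eq, pv_foldB_eq _ (by
    have := PySem.Dict.nodup_keys_counter (κ := String × String) xs
    simpa [PySem.Dict.keys] using this), pv_canonOf_counter]
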